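-- pv_equiv track=rewrite | github.com/bartpolot/mongodb-bi-connector-docker | aggregate.py | buildClassIndex
-- ===== SOURCE A (Python) =====
-- def getDocumentClassName(tableName):
--     return tableName.split("_")[-1].replace("List", "")
--
-- def buildClassIndex(db):
--     """ Build a dictionary of all classes in the database
--
--     The dictionary contains each class as key and as value
--     an array of all tables that contain this class """
--     classIndex = {}
--     for table in db["tables"]:
--         className = getDocumentClassName(table["table"])
--         if className in classIndex:
--             classIndex[className].append(table)
--         else:
--             classIndex[className] = [table]
--     return classIndex
-- ===== SOURCE B (Python) =====
-- def getDocumentClassName(tableName):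
--     return tableName.split("_")[-1].replace("List", "")
--
-- def buildClassIndex(db):
--     """Build a dictionary of all classes in the database.
--
--     Two-pass formulation: first collect the class names in order of first
--     appearance, then build each group with one filter pass per class."""
--     tables = db["tables"]
--     names = [getDocumentClassName(t["table"]) for t in tables]
--     return {c: [t for t in tables if getDocumentClassName(t["table"]) == c]
--             for c in dict.fromkeys(names)}
-- ===== Notes on version B (the rewrite author's own statement) =====
-- stated objective: alternative
-- what changed: Replaces the single-pass dict-probing accumulator (append-or-create per table) with a two-pass group-by: collect first-appearance class names via dict.fromkeys, then build each group as a filter comprehension over the tables.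
import Mathlib
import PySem

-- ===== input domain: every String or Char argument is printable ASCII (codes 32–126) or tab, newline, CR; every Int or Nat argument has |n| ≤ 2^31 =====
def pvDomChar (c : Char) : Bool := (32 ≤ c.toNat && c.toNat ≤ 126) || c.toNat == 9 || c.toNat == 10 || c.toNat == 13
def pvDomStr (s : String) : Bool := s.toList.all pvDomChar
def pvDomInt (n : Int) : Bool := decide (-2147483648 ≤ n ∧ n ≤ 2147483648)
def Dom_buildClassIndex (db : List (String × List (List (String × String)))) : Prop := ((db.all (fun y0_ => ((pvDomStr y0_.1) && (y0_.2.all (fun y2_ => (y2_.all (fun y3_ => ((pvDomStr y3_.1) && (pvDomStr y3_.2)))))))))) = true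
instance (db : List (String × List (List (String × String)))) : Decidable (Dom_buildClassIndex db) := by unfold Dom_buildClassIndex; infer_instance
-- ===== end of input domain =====

-- B replaces A's single-pass dict-probing accumulator by a two-pass group-by
-- (first-appearance key list, then one filter per class name); alternative, not faster.


-- ===== PORT A =====
-- tableName.split("_")[-1].replace("List", "")   (split "_" is never empty, so [-1] is exact via getD)
def getDocumentClassName (tableName : String) : String :=
  PySem.Str.replace ((PySem.List.pyGet? ((PySem.Str.split? tableName "_").getD []) (-1)).getD "") "List" ""

def buildClassIndex (db : List (String × List (List (String × String)))) : List (String × List (List (String × String))) :=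
  -- db["tables"] / table["table"]: KeyError excluded by Pre_, getD default never read there
  ((PySem.Dict.mk db).getD "tables" []).foldl
    (fun classIndex table =>
      let className := getDocumentClassName ((PySem.Dict.mk table).getD "table" "")
      if classIndex.contains className then
        classIndex.modify className [] (fun l => l ++ [table])
      else
        classIndex.insert className [table])
    PySem.Dict.empty
  |>.items

-- ===== PORT B =====
def buildClassIndex_alt (db : List (String × List (List (String × String)))) : List (String × List (List (String × String))) :=
  let tables := (PySem.Dict.mk db).getD "tables" []
  let names := tables.map (fun t => getDocumentClassName ((PySem.Dict.mk t).getD "table" ""))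
  (PySem.Set.ofList names).map
    (fun c => (c, tables.filter (fun t => getDocumentClassName ((PySem.Dict.mk t).getD "table" "") == c)))

-- ===== PRECONDITION & SPEC =====
-- Pre_ excludes exactly the inputs where the Python A raises KeyError: a db without the
-- "tables" key, or a table record without the "table" key.
def Pre_buildClassIndex (db : List (String × List (List (String × String)))) : Prop :=
  (PySem.Dict.mk db).contains "tables" = true ∧
  ∀ t ∈ (PySem.Dict.mk db).getD "tables" [], (PySem.Dict.mk t).contains "table" = true
instance (db : List (String × List (List (String × String)))) : Decidable (Pre_buildClassIndex db) := by unfold Pre_buildClassIndex; infer_instance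

def pvWitness_buildClassIndex : (List (String × List (List (String × String)))) :=
  [("tables", [[("table", "a_fooList")], [("table", "b_foo")], [("table", "bar")]])]

def Spec_buildClassIndex (db : List (String × List (List (String × String)))) (out : List (String × List (List (String × String)))) : Prop := out = buildClassIndex_alt db
instance (db : List (String × List (List (String × String)))) (out : List (String × List (List (String × String)))) : Decidable (Spec_buildClassIndex db out) := by unfold Spec_buildClassIndex; infer_instance

-- ===== CLAIM (what is proved, stated in full; the proofs are below) =====
def Claim_equal_buildClassIndex : Prop := ∀ (db : List (String × List (List (String × String)))), Dom_buildClassIndex db → Pre_buildClassIndex db → Spec_buildClassIndex db (buildClassIndex db)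

-- ===== LEMMAS AND PROOFS =====

-- A's branch is exactly Dict.modify with default []
theorem step_eq_modify (d : PySem.Dict String (List (List (String × String)))) (c : String)
    (t : List (String × String)) :
    (if d.contains c then d.modify c [] (fun l => l ++ [t]) else d.insert c [t]) =
      d.modify c [] (fun l => l ++ [t]) := by
  by_cases h : d.contains c = true
  · simp [h]
  · simp [h, PySem.Dict.modify, PySem.Dict.getD_of_not_contains d [] (by simpa using h)]

theorem groupFold_eq (tables : List (List (String × String)))
    (key : List (String × String) → String) :
    (tables.foldl (fun d t => d.modify (key t) [] (fun l => l ++ [t])) PySem.Dict.empty).items =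
      (PySem.Set.ofList (tables.map key)).map
        (fun c => (c, tables.filter (fun t => key t == c))) := by
  have hb : tables.foldl (fun d t => d.modify (key t) [] (fun l => l ++ [t])) PySem.Dict.empty
      = (tables.map (fun t => ((key t, t) : String × List (String × String)))).foldl
          (fun d p => d.modify p.1 [] (fun l => l ++ [p.2])) PySem.Dict.empty := by
    rw [List.foldl_map]
  set d := tables.foldl (fun d t => d.modify (key t) [] (fun l => l ++ [t])) PySem.Dict.empty with hd
  have hnd : d.keys.Nodup := by
    exact PySem.Dict.nodup_keys_foldl_modify_key tables key []
      (fun d t => (fun l => l ++ [t])) PySem.Dict.empty PySem.Dict.nodup_keys_empty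
  have hkeys : d.keys = PySem.Set.ofList (tables.map key) := by
    rw [hd, PySem.Dict.keys_foldl_modify_key, PySem.Dict.keys_empty, PySem.Set.update_nil_left]
  have hget : ∀ c, d.getD c [] = tables.filter (fun t => key t == c) := by
    intro c
    rw [hb, PySem.Dict.getD_foldl_modify_append, PySem.Dict.getD_empty]
    simp [List.filter_map, List.map_map, Function.comp_def]
  rw [PySem.Dict.items_eq_map_keys d hnd [], hkeys]
  exact List.map_congr_left (fun c _ => by rw [hget c])

-- ===== VERDICT (by name: the statement is the Claim_ definition above) =====
theorem buildClassIndex_spec : Claim_equal_buildClassIndex := by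
  intro db _ _
  unfold Spec_buildClassIndex buildClassIndex buildClassIndex_alt
  simp only [step_eq_modify]
  exact groupFold_eq _ _
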